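-- pv_equiv track=rewrite | github.com/murnet/algorithms-templates | python/practice/sprint11/tasks/04_task04.py | get_weather_randomness
-- ===== SOURCE A (Python) =====
-- from typing import List
--
-- def get_weather_randomness(temperatures: List[int]) -> int:
--     if len(temperatures) <= 1:
--         return 1
--
--     count = 0
--     for i in range(1, len(temperatures) - 1):
--         if (
--             temperatures[i] > temperatures[i - 1]
--             and temperatures[i] > temperatures[i + 1]
--         ):
--             count += 1
--
--     if temperatures[0] > temperatures[1]:
--         count += 1
--
--     if temperatures[-1] > temperatures[-2]:
--         count += 1
--
--     return count
-- ===== SOURCE B (Python) =====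
-- from typing import List
--
-- def get_weather_randomness(temperatures: List[int]) -> int:
--     if len(temperatures) <= 1:
--         return 1
--     # Difference-sequence method: a peak is exactly a rise->fall transition in
--     # the sequence of consecutive differences; a virtual rise before the list
--     # and a virtual fall after it account for the endpoints.
--     diffs = [b - a for a, b in zip(temperatures, temperatures[1:])]
--     padded = [1] + diffs + [-1]
--     return sum(1 for u, v in zip(padded, padded[1:]) if u > 0 and v < 0)
-- ===== Notes on version B (the rewrite author's own statement) =====
-- stated objective: alternative
-- what changed: B works on the derived difference sequence instead of the temperature values: it counts rise-to-fall sign transitions among consecutive differences (with a virtual rise/fall at the ends), whereas A compares each value against its two neighbours and handles the two endpoints by separate hand-written checks.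
import Mathlib
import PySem

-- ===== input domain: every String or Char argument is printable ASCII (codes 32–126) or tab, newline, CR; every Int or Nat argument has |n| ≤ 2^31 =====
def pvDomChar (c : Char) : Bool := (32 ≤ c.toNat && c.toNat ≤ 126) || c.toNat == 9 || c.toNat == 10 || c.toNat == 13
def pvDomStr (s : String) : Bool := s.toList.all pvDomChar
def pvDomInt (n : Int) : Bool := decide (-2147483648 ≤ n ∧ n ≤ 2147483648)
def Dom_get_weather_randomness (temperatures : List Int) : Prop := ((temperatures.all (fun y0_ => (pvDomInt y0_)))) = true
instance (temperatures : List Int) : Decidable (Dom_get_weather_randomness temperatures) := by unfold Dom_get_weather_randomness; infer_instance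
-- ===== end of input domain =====

-- B counts peaks as rise-to-fall sign transitions in the consecutive-difference sequence
-- (with a virtual rise/fall at the ends), instead of A's neighbour comparisons with two
-- separate endpoint checks (objective: alternative decomposition).

-- ===== PORT A =====
def get_weather_randomness (temperatures : List Int) : Int :=
  if temperatures.length ≤ 1 then 1
  else
    let n : Int := temperatures.length
    let count : Int :=
      (PySem.List.pyRange 1 (n - 1) 1).foldl
        (fun c i =>
          if PySem.List.pyGetD temperatures i 0 > PySem.List.pyGetD temperatures (i - 1) 0 ∧
             PySem.List.pyGetD temperatures i 0 > PySem.List.pyGetD temperatures (i + 1) 0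
          then c + 1 else c) 0
    let count := if PySem.List.pyGetD temperatures 0 0 > PySem.List.pyGetD temperatures 1 0 then count + 1 else count
    let count := if PySem.List.pyGetD temperatures (-1) 0 > PySem.List.pyGetD temperatures (-2) 0 then count + 1 else count
    count

-- ===== PORT B =====
-- '[b - a for a, b in zip(temperatures, temperatures[1:])]': consecutive differences.
def pvDiffs : List Int → List Int
  | a :: b :: rest => (b - a) :: pvDiffs (b :: rest)
  | _ => []

-- 'sum(1 for u, v in zip(padded, padded[1:]) if u > 0 and v < 0)': adjacent-pair count.
def pvDescCount : List Int → Int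
  | u :: v :: rest => (if u > 0 ∧ v < 0 then 1 else 0) + pvDescCount (v :: rest)
  | _ => 0

def get_weather_randomness_alt (temperatures : List Int) : Int :=
  if temperatures.length ≤ 1 then 1
  else
    let diffs := pvDiffs temperatures
    let padded := 1 :: (diffs ++ [-1])
    pvDescCount padded

-- ===== PRECONDITION & SPEC =====
def Spec_get_weather_randomness (temperatures : List Int) (out : Int) : Prop := out = get_weather_randomness_alt temperatures
instance (temperatures : List Int) (out : Int) : Decidable (Spec_get_weather_randomness temperatures out) := by unfold Spec_get_weather_randomness; infer_instance

-- ===== CLAIM (what is proved, stated in full; the proofs are below) =====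
def Claim_equal_get_weather_randomness : Prop := ∀ (temperatures : List Int), Dom_get_weather_randomness temperatures → Spec_get_weather_randomness temperatures (get_weather_randomness temperatures)

-- ===== LEMMAS AND PROOFS =====

-- proof-side characterisation of A: count of strict interior peaks, structurally
def pvTripleCount : List Int → Int
  | a :: b :: c :: rest => (if b > a ∧ b > c then 1 else 0) + pvTripleCount (b :: c :: rest)
  | _ => 0

-- "does the last element strictly exceed the one before it", phrased structurally
def pvLastStep : List Int → Int
  | [x, y] => if y > x then 1 else 0
  | _ :: b :: c :: rest => pvLastStep (b :: c :: rest)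
  | _ => 0

-- pvTripleCount as a sum over window indices
lemma tc_eq_sum : ∀ (l : List Int),
    pvTripleCount l =
      ((List.range (l.length - 2)).map
        (fun k => if l.getD (k+1) 0 > l.getD k 0 ∧ l.getD (k+1) 0 > l.getD (k+2) 0 then (1:Int) else 0)).sum := by
  intro l
  match l with
  | [] => simp [pvTripleCount]
  | [a] => simp [pvTripleCount]
  | [a, b] => simp [pvTripleCount]
  | a :: b :: c :: rest =>
    have ih := tc_eq_sum (b :: c :: rest)
    show (if b > a ∧ b > c then (1:Int) else 0) + pvTripleCount (b :: c :: rest) = _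
    rw [ih]
    have hlen : (a :: b :: c :: rest).length - 2 = rest.length + 1 := by simp
    have hlen' : (b :: c :: rest).length - 2 = rest.length := by simp
    rw [hlen, hlen', List.range_succ_eq_map]
    simp only [List.map_cons, List.sum_cons, List.map_map]
    congr 1

-- pvLastStep via getD access from the back
lemma lastStep_eq : ∀ (rest : List Int) (x y : Int),
    pvLastStep (x :: y :: rest) =
      if (x :: y :: rest).getLast (by simp) > (x :: y :: rest).getD ((x :: y :: rest).length - 2) 0 then 1 else 0 := by
  intro rest
  induction rest with
  | nil => intro x y; simp [pvLastStep]
  | cons c r ih =>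
    intro x y
    show pvLastStep (y :: c :: r) = _
    rw [ih y c]
    have h1 : (x :: y :: c :: r).getLast (by simp) = (y :: c :: r).getLast (by simp) := by
      simp [List.getLast_cons]
    have h2 : (x :: y :: c :: r).getD ((x :: y :: c :: r).length - 2) 0
            = (y :: c :: r).getD ((y :: c :: r).length - 2) 0 := by
      rw [show (x :: y :: c :: r).length - 2 = ((y :: c :: r).length - 2) + 1 by simp]
      rw [List.getD_cons_succ]
    rw [h1, h2]

-- the foldl counter equals init plus the 0/1 sum
lemma foldl_count {α : Type} (P : α → Prop) [DecidablePred P] :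
    ∀ (xs : List α) (c : Int),
      xs.foldl (fun c i => if P i then c + 1 else c) c
        = c + (xs.map (fun i => if P i then (1:Int) else 0)).sum := by
  intro xs
  induction xs with
  | nil => intro c; simp
  | cons a t ih =>
    intro c
    simp only [List.foldl_cons, List.map_cons, List.sum_cons]
    rw [ih]
    split_ifs <;> ring

-- A's interior loop computes the triple count of the list
lemma A_fold_eq_tc (t : List Int) (h2 : 2 ≤ t.length) :
    (PySem.List.pyRange 1 ((t.length : Int) - 1) 1).foldl
      (fun c i =>
        if PySem.List.pyGetD t i 0 > PySem.List.pyGetD t (i - 1) 0 ∧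
           PySem.List.pyGetD t i 0 > PySem.List.pyGetD t (i + 1) 0
        then c + 1 else c) 0 = pvTripleCount t := by
  rw [PySem.List.pyRange_one, List.foldl_map,
      foldl_count (fun k : Nat => PySem.List.pyGetD t (1 + (k:Int)) 0 > PySem.List.pyGetD t (1 + (k:Int) - 1) 0 ∧
        PySem.List.pyGetD t (1 + (k:Int)) 0 > PySem.List.pyGetD t (1 + (k:Int) + 1) 0)]
  rw [tc_eq_sum t]
  rw [show ((t.length : Int) - 1 - 1).toNat = t.length - 2 by omega]
  rw [zero_add]
  apply congrArg
  apply List.map_congr_left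
  intro k _
  have e1 : (1 + (k:Int)) = ((k + 1 : Nat) : Int) := by omega
  have e2 : (1 + (k:Int) - 1) = ((k : Nat) : Int) := by omega
  have e3 : (1 + (k:Int) + 1) = ((k + 2 : Nat) : Int) := by omega
  have g : ∀ i : Nat, PySem.List.pyGetD t (i:Int) 0 = t.getD i 0 := by
    intro i; rw [PySem.List.pyGetD_natCast]
  rw [e3, e2, e1, g (k+2), g k, g (k+1)]

-- the descent count over padded diffs equals interior-peak count plus the last-step peak
lemma desc_eq : ∀ (rest : List Int) (x y : Int),
    pvDescCount ((y - x) :: (pvDiffs (y :: rest) ++ [-1]))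
      = pvTripleCount (x :: y :: rest) + pvLastStep (x :: y :: rest) := by
  intro rest
  induction rest with
  | nil =>
    intro x y
    show (if y - x > 0 ∧ (-1:Int) < 0 then (1:Int) else 0) + 0 = 0 + if y > x then 1 else 0
    split_ifs with h1 h2 <;> omega
  | cons c r ih =>
    intro x y
    show (if y - x > 0 ∧ c - y < 0 then (1:Int) else 0) + pvDescCount ((c - y) :: (pvDiffs (c :: r) ++ [-1]))
        = ((if y > x ∧ y > c then (1:Int) else 0) + pvTripleCount (y :: c :: r)) + pvLastStep (y :: c :: r)
    rw [ih y c]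
    have : (if y - x > 0 ∧ c - y < 0 then (1:Int) else 0) = (if y > x ∧ y > c then (1:Int) else 0) := by
      split_ifs with h1 h2 <;> omega
    rw [this]; ring

-- ===== VERDICT (by name: the statement is the Claim_ definition above) =====
theorem get_weather_randomness_spec : Claim_equal_get_weather_randomness := by
  intro t _
  unfold Spec_get_weather_randomness get_weather_randomness get_weather_randomness_alt
  by_cases hshort : t.length ≤ 1
  · simp [hshort]
  · simp only [if_neg hshort]
    cases t with
    | nil => simp at hshort
    | cons x t' =>
      cases t' with
      | nil => simp at hshort
      | cons y rest =>
        have h2 : 2 ≤ (x :: y :: rest).length := by simp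
        -- B side: peel the leading virtual rise, then apply desc_eq
        have hB : pvDescCount (1 :: (pvDiffs (x :: y :: rest) ++ [-1]))
            = (if x > y then (1:Int) else 0) + (pvTripleCount (x :: y :: rest) + pvLastStep (x :: y :: rest)) := by
          show (if (1:Int) > 0 ∧ y - x < 0 then (1:Int) else 0) + pvDescCount ((y - x) :: (pvDiffs (y :: rest) ++ [-1])) = _
          rw [desc_eq rest x y]
          congr 1
          split_ifs with h1 h2 <;> omega
        rw [hB]
        -- A side
        rw [A_fold_eq_tc (x :: y :: rest) h2]
        have hfst : PySem.List.pyGetD (x :: y :: rest) 0 0 = x := by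
          simp [PySem.List.pyGetD_zero_cons]
        have hsnd : PySem.List.pyGetD (x :: y :: rest) 1 0 = y := by
          rw [show (1 : Int) = ((1 : Nat) : Int) by norm_num, PySem.List.pyGetD_natCast]
          rfl
        have hlast : PySem.List.pyGetD (x :: y :: rest) (-1) 0 = (x :: y :: rest).getLast (by simp) := by
          rw [PySem.List.pyGetD_neg_one]
        have hpen : PySem.List.pyGetD (x :: y :: rest) (-2) 0
            = (x :: y :: rest).getD ((x :: y :: rest).length - 2) 0 := by
          rw [PySem.List.pyGetD_neg_ofNat (x :: y :: rest) 2 0 (by omega) (by simp)]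
          rw [List.getD_eq_getElem _ _ (by simp)]
          rfl
        rw [hfst, hsnd, hlast, hpen]
        rw [lastStep_eq rest x y]
        split_ifs <;> ring
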